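-- pv_equiv track=rewrite | github.com/letkemanpete78/pyscript | directory_cleanUp.py | space_before_num
-- ===== SOURCE A (Python) =====
-- def space_before_num(newname):
--     finalname = ''
--     firstdigit = True
--     for c in newname:
--         if c.isdigit():
--             if firstdigit:
--                 finalname += " " + c
--                 firstdigit = False
--             else:
--                 finalname += c
--         else:
--             finalname += c
--             firstdigit = True
--     return finalname
-- ===== SOURCE B (Python) =====
-- from itertools import groupby
--
-- def space_before_num(newname):
--     pieces = []
--     for isdig, group in groupby(newname, key=str.isdigit):
--         chars = ''.join(group)
--         pieces.append(' ' + chars if isdig else chars)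
--     return ''.join(pieces)
-- ===== Notes on version B (the rewrite author's own statement) =====
-- stated objective: idiomatic
-- what changed: B groups the string into maximal digit/non-digit runs with itertools.groupby and joins the pieces once, prefixing digit runs with a space, instead of A's per-character loop with a firstdigit flag and repeated string concatenation.
import Mathlib
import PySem

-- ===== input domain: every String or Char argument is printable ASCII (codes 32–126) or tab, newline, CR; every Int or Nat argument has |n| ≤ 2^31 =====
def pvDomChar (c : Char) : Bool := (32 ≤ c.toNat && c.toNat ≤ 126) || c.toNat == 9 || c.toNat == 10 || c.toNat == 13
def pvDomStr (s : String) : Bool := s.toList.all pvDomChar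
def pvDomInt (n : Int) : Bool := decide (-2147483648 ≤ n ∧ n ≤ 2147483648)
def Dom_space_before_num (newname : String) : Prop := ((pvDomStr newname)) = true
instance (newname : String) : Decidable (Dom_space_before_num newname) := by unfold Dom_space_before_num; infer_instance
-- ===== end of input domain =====

-- B rebuilds the string from maximal digit/non-digit runs (groupby) instead of A's per-character loop with a firstdigit flag; objective: idiomatic.

-- ===== PORT A =====
-- one step of A's for-loop: state = (finalname so far, firstdigit flag)
def pvAStep (st : List Char × Bool) (c : Char) : List Char × Bool :=
  if PySem.Chars.isdigit c then
    if st.2 then (st.1 ++ [' ', c], false)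
    else (st.1 ++ [c], st.2)
  else (st.1 ++ [c], true)

def space_before_num (newname : String) : String :=
  String.ofList (newname.toList.foldl pvAStep ([], true)).1

-- ===== PORT B =====
-- groupby(newname, key=str.isdigit): peel off one maximal run per step
def pvAltGo (cs : List Char) : List Char :=
  match cs with
  | [] => []
  | c :: rest =>
    let k := PySem.Chars.isdigit c
    let chars := c :: rest.takeWhile (fun d => PySem.Chars.isdigit d == k)
    let rest' := rest.dropWhile (fun d => PySem.Chars.isdigit d == k)
    (if k then ' ' :: chars else chars) ++ pvAltGo rest'
termination_by cs.length
decreasing_by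
  simp only [List.length_cons]
  exact Nat.lt_succ_of_le (List.length_dropWhile_le _ _)

def space_before_num_alt (newname : String) : String :=
  String.ofList (pvAltGo newname.toList)

-- ===== PRECONDITION & SPEC =====
def Spec_space_before_num (newname : String) (out : String) : Prop := out = space_before_num_alt newname
instance (newname : String) (out : String) : Decidable (Spec_space_before_num newname out) := by unfold Spec_space_before_num; infer_instance

-- ===== CLAIM (what is proved, stated in full; the proofs are below) =====
def Claim_equal_space_before_num : Prop := ∀ (newname : String), Dom_space_before_num newname → Spec_space_before_num newname (space_before_num newname)

-- ===== LEMMAS AND PROOFS =====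

-- accumulator-free form of A's loop
def pvAGo (b : Bool) (cs : List Char) : List Char :=
  match cs with
  | [] => []
  | c :: t =>
    if PySem.Chars.isdigit c then
      if b then ' ' :: c :: pvAGo false t else c :: pvAGo false t
    else c :: pvAGo true t

theorem pvFoldl_aGo (cs : List Char) : ∀ (acc : List Char) (b : Bool),
    (cs.foldl pvAStep (acc, b)).1 = acc ++ pvAGo b cs := by
  induction cs with
  | nil => intro acc b; simp [pvAGo]
  | cons c t ih =>
    intro acc b
    simp only [List.foldl_cons, pvAStep, pvAGo]
    by_cases h : PySem.Chars.isdigit c <;> cases b <;> simp [h, ih]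

theorem pvAGo_false_run (l : List Char) :
    pvAGo false l =
      l.takeWhile (fun d => PySem.Chars.isdigit d == true)
        ++ pvAGo false (l.dropWhile (fun d => PySem.Chars.isdigit d == true)) := by
  induction l with
  | nil => simp
  | cons d t ih =>
    by_cases h : PySem.Chars.isdigit d
    · simp [pvAGo, h, ih]
    · simp [pvAGo, h]

theorem pvAGo_true_run (l : List Char) :
    pvAGo true l =
      l.takeWhile (fun d => PySem.Chars.isdigit d == false)
        ++ pvAGo true (l.dropWhile (fun d => PySem.Chars.isdigit d == false)) := by
  induction l with
  | nil => simp
  | cons d t ih =>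
    by_cases h : PySem.Chars.isdigit d
    · simp [pvAGo, h]
    · simp [pvAGo, h, ih]

theorem pvAGo_false_true_drop (rest : List Char) :
    pvAGo false (rest.dropWhile (fun d => PySem.Chars.isdigit d == true))
      = pvAGo true (rest.dropWhile (fun d => PySem.Chars.isdigit d == true)) := by
  cases hd : rest.dropWhile (fun d => PySem.Chars.isdigit d == true) with
  | nil => rfl
  | cons x t =>
    have h0 := List.head?_dropWhile_not (fun d => PySem.Chars.isdigit d == true) rest
    rw [hd] at h0
    simp only [List.head?_cons] at h0
    have hx : PySem.Chars.isdigit x = false := by simpa using h0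
    simp [pvAGo, hx]

theorem pvAGo_eq_altGo_len (n : Nat) : ∀ cs : List Char, cs.length ≤ n → pvAGo true cs = pvAltGo cs := by
  induction n with
  | zero =>
    intro cs h
    have : cs = [] := by cases cs <;> simp_all
    subst this
    rw [pvAltGo]
    rfl
  | succ n ih =>
    intro cs h
    cases cs with
    | nil => rw [pvAltGo]; rfl
    | cons c rest =>
      rw [pvAltGo]
      have hlen : rest.length ≤ n := by simpa using h
      by_cases hc : PySem.Chars.isdigit c
      · have hrest : (rest.dropWhile (fun d => PySem.Chars.isdigit d == true)).length ≤ n :=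
          le_trans (List.length_dropWhile_le _ _) hlen
        simp only [hc, if_pos]
        simp only [pvAGo, hc, if_pos, pvAGo_false_run rest, pvAGo_false_true_drop rest,
          ih _ hrest]
        simp
      · have hrest : (rest.dropWhile (fun d => PySem.Chars.isdigit d == false)).length ≤ n :=
          le_trans (List.length_dropWhile_le _ _) hlen
        simp only [hc]
        simp only [pvAGo, hc, pvAGo_true_run rest, ih _ hrest]
        simp

theorem pvAGo_eq_altGo (cs : List Char) : pvAGo true cs = pvAltGo cs :=
  pvAGo_eq_altGo_len cs.length cs le_rfl

-- ===== VERDICT (by name: the statement is the Claim_ definition above) =====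
theorem space_before_num_spec : Claim_equal_space_before_num := by
  intro s _
  unfold Spec_space_before_num space_before_num space_before_num_alt
  rw [pvFoldl_aGo, pvAGo_eq_altGo]
  simp
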